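-- pv_equiv track=rewrite | github.com/Trevor-Ferris/Advent-of-Code-2024 | Aoc19/Aoc19p1.py | check_display
-- ===== SOURCE A (Python) =====
-- def check_display(towels, display, long_towel):
--     """Returns true if the display can be made from any combination of towels"""
--     if display in towels:
--         return True
--     for pos in range(1, len(display)):
--         if display[:pos] in towels:
--             return check_display(towels, display[pos:], long_towel)
--         if pos > long_towel:
--             return False
--     return False
-- ===== SOURCE B (Python) =====
-- def check_display(towels, display, long_towel):
--     """Iterative greedy: each round strip the shortest usable towel prefix
--     (found by scanning the towel list, not display positions)."""
--     bound = max(long_towel + 1, 1)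
--     while display not in towels:
--         limit = min(len(display) - 1, bound)
--         best = min((len(t) for t in towels
--                     if 0 < len(t) <= limit and display.startswith(t)),
--                    default=0)
--         if best == 0:
--             return False
--         display = display[best:]
--     return True
-- ===== Notes on version B (the rewrite author's own statement) =====
-- stated objective: alternative
-- what changed: Replaces A's recursion with an inner scan over display positions by an iterative while-loop that each round scans the towel list for the shortest towel that is a usable proper prefix (length capped by min(len(display)-1, long_towel+1)) and strips it; same greedy result, different traversal (over towels instead of positions).
import Mathlib
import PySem

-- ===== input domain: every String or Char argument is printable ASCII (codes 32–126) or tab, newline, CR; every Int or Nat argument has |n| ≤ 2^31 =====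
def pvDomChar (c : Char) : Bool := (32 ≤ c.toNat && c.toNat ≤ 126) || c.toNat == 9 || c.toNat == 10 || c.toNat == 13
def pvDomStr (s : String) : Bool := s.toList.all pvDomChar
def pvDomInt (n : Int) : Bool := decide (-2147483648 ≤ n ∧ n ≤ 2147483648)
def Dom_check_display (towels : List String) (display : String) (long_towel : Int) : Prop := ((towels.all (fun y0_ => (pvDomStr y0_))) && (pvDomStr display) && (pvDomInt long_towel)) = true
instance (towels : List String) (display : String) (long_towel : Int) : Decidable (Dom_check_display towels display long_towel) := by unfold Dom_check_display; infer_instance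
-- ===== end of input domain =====

-- B replaces A's recursion-with-position-scan by an iterative greedy loop that finds the
-- shortest usable prefix by scanning the towel list instead (objective: alternative).

-- ===== PORT A =====
-- A's inner `for pos in range(1, len(display))` loop: returns the pos at which A recurses,
-- or none for A's `return False` paths (strings handled as their char lists).
def pvFindA (ts : List (List Char)) (d : List Char) (lt : Int) (pos : Nat) : Option Nat :=
  if pos < d.length then
    if ts.contains (d.take pos) then some pos
    else if (pos : Int) > lt then none
    else pvFindA ts d lt (pos + 1)
  else none
termination_by d.length - pos

-- termination fact for pvGoA (the pos returned by the scan is a proper position)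
theorem pvFindA_bounds (ts : List (List Char)) (d : List Char) (lt : Int) (pos p : Nat)
    (h : pvFindA ts d lt pos = some p) : pos ≤ p ∧ p < d.length := by
  fun_induction pvFindA ts d lt pos with
  | case1 pos hlt hc => simp at h; omega
  | case2 pos hlt hc hgt => simp at h
  | case3 pos hlt hc hgt ih => have := ih h; omega
  | case4 pos hlt => simp at h

def pvGoA (ts : List (List Char)) (d : List Char) (lt : Int) : Bool :=
  if ts.contains d then true
  else
    match h : pvFindA ts d lt 1 with
    | some p => pvGoA ts (d.drop p) lt
    | none => false
termination_by d.length
decreasing_by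
  have := pvFindA_bounds ts d lt 1 p h
  simp; omega

def check_display (towels : List String) (display : String) (long_towel : Int) : Bool :=
  pvGoA (towels.map String.toList) display.toList long_towel

-- ===== PORT B =====
-- the genexp's candidates: lengths of towels that are usable proper prefixes of d
def pvCandsB (ts : List (List Char)) (d : List Char) (limit : Int) : List Nat :=
  ts.filterMap (fun t =>
    if 0 < t.length ∧ (t.length : Int) ≤ limit ∧ d.take t.length = t then some t.length else none)

-- min(..., default=0)
def pvBestB (ts : List (List Char)) (d : List Char) (limit : Int) : Nat :=
  ((pvCandsB ts d limit).min?).getD 0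

-- termination fact for pvGoB (a nonzero best is at most limit)
theorem mem_pvCandsB_facts (ts : List (List Char)) (d : List Char) (limit : Int) :
    ∀ m ∈ pvCandsB ts d limit, 0 < m ∧ (m : Int) ≤ limit ∧ ts.contains (d.take m) = true := by
  intro m hm
  unfold pvCandsB at hm
  simp only [List.mem_filterMap] at hm
  obtain ⟨t, hts, ht⟩ := hm
  split_ifs at ht with hc
  obtain ⟨h1, h2, h3⟩ := hc
  simp only [Option.some_inj] at ht
  subst ht
  refine ⟨h1, h2, ?_⟩
  rw [h3]
  simpa [List.contains_iff_mem] using hts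

theorem pvBestB_le (ts : List (List Char)) (d : List Char) (limit : Int)
    (h : pvBestB ts d limit ≠ 0) : 0 < pvBestB ts d limit ∧ (pvBestB ts d limit : Int) ≤ limit := by
  unfold pvBestB at h ⊢
  cases hm : (pvCandsB ts d limit).min? with
  | none => rw [hm] at h; simp at h
  | some m =>
      simp only [Option.getD_some]
      rw [List.min?_eq_some_iff] at hm
      have := mem_pvCandsB_facts ts d limit m hm.1
      exact ⟨this.1, this.2.1⟩

def pvGoB (ts : List (List Char)) (bound : Int) (d : List Char) : Bool :=
  if ts.contains d then true
  else if pvBestB ts d (min ((d.length : Int) - 1) bound) = 0 then false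
  else pvGoB ts bound (d.drop (pvBestB ts d (min ((d.length : Int) - 1) bound)))
termination_by d.length
decreasing_by
  have := pvBestB_le ts d (min ((d.length : Int) - 1) bound) (by assumption)
  simp; omega

def check_display_alt (towels : List String) (display : String) (long_towel : Int) : Bool :=
  pvGoB (towels.map String.toList) (max (long_towel + 1) 1) display.toList

-- ===== PRECONDITION & SPEC =====
def Spec_check_display (towels : List String) (display : String) (long_towel : Int) (out : Bool) : Prop := out = check_display_alt towels display long_towel
instance (towels : List String) (display : String) (long_towel : Int) (out : Bool) : Decidable (Spec_check_display towels display long_towel out) := by unfold Spec_check_display; infer_instance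

-- ===== CLAIM (what is proved, stated in full; the proofs are below) =====
def Claim_equal_check_display : Prop := ∀ (towels : List String) (display : String) (long_towel : Int), Dom_check_display towels display long_towel → Spec_check_display towels display long_towel (check_display towels display long_towel)

-- ===== LEMMAS AND PROOFS =====

-- characterisation of A's inner scan: it yields the first pos with a towel prefix,
-- provided no earlier pos already exceeded long_towel
theorem pvFindA_some_iff (ts : List (List Char)) (d : List Char) (lt : Int) (pos p : Nat) :
    pvFindA ts d lt pos = some p ↔
      (pos ≤ p ∧ p < d.length ∧ ts.contains (d.take p) = true ∧
        ∀ q, pos ≤ q → q < p → (ts.contains (d.take q) = false ∧ (q : Int) ≤ lt)) := by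
  fun_induction pvFindA ts d lt pos with
  | case1 pos hlt hc =>
      simp only [Option.some_inj]
      constructor
      · rintro rfl
        exact ⟨le_refl _, hlt, hc, by omega⟩
      · rintro ⟨h1, h2, h3, h4⟩
        by_contra hne
        have hq := (h4 pos (le_refl _) (by omega)).1
        rw [hc] at hq
        exact absurd hq (by simp)
  | case2 pos hlt hc hgt =>
      constructor
      · intro h; exact absurd h (by simp)
      · rintro ⟨h1, h2, h3, h4⟩
        exfalso
        rcases Nat.lt_or_ge pos p with hpp | hpp
        · have := (h4 pos (le_refl _) hpp).2
          omega
        · have : pos = p := by omega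
          subst this
          rw [h3] at hc
          exact hc rfl
  | case3 pos hlt hc hgt ih =>
      rw [ih]
      have hcf : ts.contains (d.take pos) = false := by
        cases hcc : ts.contains (d.take pos)
        · rfl
        · exact absurd hcc hc
      constructor
      · rintro ⟨h1, h2, h3, h4⟩
        refine ⟨by omega, h2, h3, ?_⟩
        intro q hq1 hq2
        rcases Nat.lt_or_ge q (pos + 1) with hqp | hqp
        · have : q = pos := by omega
          subst this
          exact ⟨hcf, by omega⟩
        · exact h4 q hqp hq2
      · rintro ⟨h1, h2, h3, h4⟩
        have hne : pos ≠ p := by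
          rintro rfl
          rw [h3] at hcf
          simp at hcf
        refine ⟨by omega, h2, h3, ?_⟩
        intro q hq1 hq2
        exact h4 q (by omega) hq2
  | case4 pos hlt =>
      constructor
      · intro h; exact absurd h (by simp)
      · rintro ⟨h1, h2, h3, h4⟩
        exfalso
        omega

-- the bridge: A's scan result equals B's shortest usable towel length
theorem pv_key (ts : List (List Char)) (d : List Char) (lt : Int) :
    pvFindA ts d lt 1 =
      (if pvBestB ts d (min ((d.length : Int) - 1) (max (lt + 1) 1)) = 0 then none
       else some (pvBestB ts d (min ((d.length : Int) - 1) (max (lt + 1) 1)))) := by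
  have hmem : ∀ p : Nat, p ∈ pvCandsB ts d (min ((d.length : Int) - 1) (max (lt + 1) 1)) ↔
      (0 < p ∧ (p : Int) ≤ min ((d.length : Int) - 1) (max (lt + 1) 1) ∧ ts.contains (d.take p) = true) := by
    intro p
    constructor
    · intro hp
      exact mem_pvCandsB_facts ts d _ p hp
    · rintro ⟨h1, h2, h3⟩
      unfold pvCandsB
      simp only [List.mem_filterMap]
      have hplen : p < d.length := by omega
      have hmm : d.take p ∈ ts := by simpa [List.contains_iff_mem] using h3
      refine ⟨d.take p, hmm, ?_⟩
      have hlen : (d.take p).length = p := by simp; omega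
      rw [if_pos ⟨by omega, by rw [hlen]; exact_mod_cast h2, by rw [hlen]⟩, hlen]
  unfold pvBestB
  cases hm : (pvCandsB ts d (min ((d.length : Int) - 1) (max (lt + 1) 1))).min? with
  | none =>
      rw [List.min?_eq_none_iff] at hm
      simp only [Option.getD_none]
      cases hf : pvFindA ts d lt 1 with
      | none => rfl
      | some p =>
          exfalso
          rw [pvFindA_some_iff] at hf
          obtain ⟨h1, h2, h3, h4⟩ := hf
          have hpb : (p : Int) ≤ max (lt + 1) 1 := by
            rcases Nat.lt_or_ge p 2 with hp2 | hp2
            · have : p = 1 := by omega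
              subst this
              simp
            · have := (h4 (p - 1) (by omega) (by omega)).2
              have hcast : ((p - 1 : Nat) : Int) = (p : Int) - 1 := by omega
              omega
          have : p ∈ pvCandsB ts d (min ((d.length : Int) - 1) (max (lt + 1) 1)) := by
            rw [hmem]
            refine ⟨by omega, by omega, h3⟩
          rw [hm] at this
          simp at this
  | some m =>
      rw [List.min?_eq_some_iff] at hm
      obtain ⟨hmm, hmin⟩ := hm
      rw [hmem] at hmm
      obtain ⟨hm1, hm2, hm3⟩ := hmm
      simp only [Option.getD_some, if_neg (by omega : ¬ m = 0)]
      rw [pvFindA_some_iff]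
      refine ⟨by omega, by omega, hm3, ?_⟩
      intro q hq1 hq2
      constructor
      · cases hqc : ts.contains (d.take q) with
        | false => rfl
        | true =>
            exfalso
            have hqmem : q ∈ pvCandsB ts d (min ((d.length : Int) - 1) (max (lt + 1) 1)) := by
              rw [hmem]
              exact ⟨by omega, by omega, hqc⟩
            have := hmin q hqmem
            omega
      · -- q < m ≤ bound; if bound = 1 then m = 1 and no such q; else bound = lt+1
        have hb : (m : Int) ≤ max (lt + 1) 1 := by omega
        rcases le_or_gt (lt + 1) 1 with hl | hl
        · have : (m : Int) ≤ 1 := by omega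
          omega
        · have : (m : Int) ≤ lt + 1 := by omega
          omega


theorem pv_main (ts : List (List Char)) (lt : Int) (d : List Char) :
    pvGoA ts d lt = pvGoB ts (max (lt + 1) 1) d := by
  fun_induction pvGoA ts d lt with
  | case1 d hc => rw [pvGoB, if_pos hc]
  | case2 d hc p hfind ih =>
      have hk := pv_key ts d lt
      rw [hfind] at hk
      split_ifs at hk with h0
      have hpb : p = pvBestB ts d (min ((d.length : Int) - 1) (max (lt + 1) 1)) := Option.some.inj hk
      rw [pvGoB, if_neg hc, if_neg h0, ← hpb]
      exact ih
  | case3 d hc hfind =>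
      have hk := pv_key ts d lt
      rw [hfind] at hk
      split_ifs at hk with h0
      rw [pvGoB, if_neg hc, if_pos h0]

-- ===== VERDICT (by name: the statement is the Claim_ definition above) =====
theorem check_display_spec : Claim_equal_check_display := by
  intro towels display long_towel _
  unfold Spec_check_display check_display check_display_alt
  exact pv_main _ _ _
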